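-- pv_equiv track=rewrite | github.com/babbush/HistoricalFermiLib | src/fermilib/utils/_jellium.py | orbital_id
-- ===== SOURCE A (Python) =====
-- class OrbitalSpecificationError(Exception):
--     pass
--
-- def orbital_id(grid_length, grid_coordinates, spin=None):
--     """Return the tensor factor of a orbital with given coordinates and spin.
--
--     Args:
--         grid_length: Int, the number of points in one dimension of the grid.
--         grid_coordinates: List or tuple of ints giving coordinates of grid
--             element. Acceptable to provide an int (instead of tuple or list)
--             for 1D case.
--         spin: Boole, 0 means spin down and 1 means spin up.
--             If None, assume spinless model.
--
--     Returns:
--         tensor_factor: The tensor factor associated with provided orbital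
--         label.
--
--     Raises:
--         OrbitalSpecificiationError: Invalid orbital coordinates provided.
--     """
--     # Initialize.
--     if isinstance(grid_coordinates, int):
--         grid_coordinates = [grid_coordinates]
--
--     # Loop through dimensions of coordinate tuple.
--     tensor_factor = 0
--     for dimension, grid_coordinate in enumerate(grid_coordinates):
--
--         # Make sure coordinate is an integer in the correct bounds.
--         if isinstance(grid_coordinate, int) and grid_coordinate < grid_length:
--             tensor_factor += grid_coordinate * (grid_length ** dimension)
--
--         else:
--             # Raise for invalid model.
--             raise OrbitalSpecificationError(
--                 'Invalid orbital coordinates provided.')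
--
--     # Account for spin and return.
--     if spin is None:
--         return tensor_factor
--     else:
--         tensor_factor *= 2
--         tensor_factor += spin
--         return tensor_factor
-- ===== SOURCE B (Python) =====
-- from functools import reduce
--
-- class OrbitalSpecificationError(Exception):
--     pass
--
-- def orbital_id(grid_length, grid_coordinates, spin=None):
--     """Return the tensor factor of a orbital with given coordinates and spin."""
--     if isinstance(grid_coordinates, int):
--         coords = [grid_coordinates]
--     else:
--         coords = list(grid_coordinates)
--
--     # Stage 1: validate every coordinate up front.
--     if not all(isinstance(c, int) and c < grid_length for c in coords):
--         raise OrbitalSpecificationError('Invalid orbital coordinates provided.')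
--
--     # Stage 2: fold the coordinates big-endian (Horner), no powers needed.
--     tensor_factor = reduce(lambda acc, c: acc * grid_length + c,
--                            reversed(coords), 0)
--
--     if spin is None:
--         return tensor_factor
--     return 2 * tensor_factor + spin
-- ===== Notes on version B (the rewrite author's own statement) =====
-- stated objective: alternative
-- what changed: B splits A's single validating enumerate loop into two stages: an up-front all() validity check, then one functools.reduce Horner fold over the reversed coordinates, eliminating the dimension index and the grid_length**dimension power.
import Mathlib
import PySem

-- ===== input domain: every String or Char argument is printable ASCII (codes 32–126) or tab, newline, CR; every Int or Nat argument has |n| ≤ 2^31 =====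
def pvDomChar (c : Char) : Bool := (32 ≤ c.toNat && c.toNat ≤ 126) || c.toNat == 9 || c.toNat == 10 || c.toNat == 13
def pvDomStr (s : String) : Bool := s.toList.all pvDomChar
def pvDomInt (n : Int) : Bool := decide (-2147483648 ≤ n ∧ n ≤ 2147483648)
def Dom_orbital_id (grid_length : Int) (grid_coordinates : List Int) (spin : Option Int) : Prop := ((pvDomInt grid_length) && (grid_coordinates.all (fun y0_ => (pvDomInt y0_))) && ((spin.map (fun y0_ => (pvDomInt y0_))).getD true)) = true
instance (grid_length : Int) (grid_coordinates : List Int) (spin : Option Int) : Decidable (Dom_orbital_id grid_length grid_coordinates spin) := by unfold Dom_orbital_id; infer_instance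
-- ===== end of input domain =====

-- B validates all coordinates up front, then folds them big-endian (Horner): a
-- staged decomposition of A's single validating power-sum loop; same exact values.

-- ===== PORT A =====
-- enumerate loop: tensor_factor += coord * grid_length ** dimension; none = the raise.
def orbitalLoopA (grid_length : Int) : List Int → Nat → Int → Option Int
  | [], _, acc => some acc
  | c :: rest, dim, acc =>
    if c < grid_length then orbitalLoopA grid_length rest (dim + 1) (acc + c * grid_length ^ dim)
    else none

def orbital_id (grid_length : Int) (grid_coordinates : List Int) (spin : Option Int) : Int :=
  match orbitalLoopA grid_length grid_coordinates 0 0 with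
  | none => 0      -- Python raises here; excluded by Pre_orbital_id
  | some tensor_factor =>
    match spin with
    | none => tensor_factor
    | some s => tensor_factor * 2 + s

-- ===== PORT B =====
-- stage 1: all() validity check; stage 2: foldr = reduce over the reversed list.
def orbital_id_alt (grid_length : Int) (grid_coordinates : List Int) (spin : Option Int) : Int :=
  if grid_coordinates.all (fun c => decide (c < grid_length)) then
    let tensor_factor := grid_coordinates.foldr (fun c acc => acc * grid_length + c) 0
    match spin with
    | none => tensor_factor
    | some s => 2 * tensor_factor + s
  else 0           -- Python raises here; excluded by Pre_orbital_id

-- ===== PRECONDITION & SPEC =====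
-- Pre_ excludes exactly the inputs where A raises OrbitalSpecificationError (some coordinate ≥ grid_length).
def Pre_orbital_id (grid_length : Int) (grid_coordinates : List Int) (spin : Option Int) : Prop :=
  ∀ c ∈ grid_coordinates, c < grid_length
instance (grid_length : Int) (grid_coordinates : List Int) (spin : Option Int) : Decidable (Pre_orbital_id grid_length grid_coordinates spin) := by unfold Pre_orbital_id; infer_instance

def pvWitness_orbital_id : Int × List Int × Option Int := (4, [1, 3, 0], some 1)

def Spec_orbital_id (grid_length : Int) (grid_coordinates : List Int) (spin : Option Int) (out : Int) : Prop := out = orbital_id_alt grid_length grid_coordinates spin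
instance (grid_length : Int) (grid_coordinates : List Int) (spin : Option Int) (out : Int) : Decidable (Spec_orbital_id grid_length grid_coordinates spin out) := by unfold Spec_orbital_id; infer_instance

-- ===== CLAIM =====
def Claim_equal_orbital_id : Prop := ∀ (grid_length : Int) (grid_coordinates : List Int) (spin : Option Int), Dom_orbital_id grid_length grid_coordinates spin → Pre_orbital_id grid_length grid_coordinates spin → Spec_orbital_id grid_length grid_coordinates spin (orbital_id grid_length grid_coordinates spin)

-- ===== LEMMAS AND PROOFS =====

lemma loopA_ok (gl : Int) (xs : List Int) (h : ∀ c ∈ xs, c < gl) :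
    ∀ (dim : Nat) (acc : Int),
      orbitalLoopA gl xs dim acc
        = some (acc + gl ^ dim * xs.foldr (fun c a => a * gl + c) 0) := by
  induction xs with
  | nil => intro dim acc; simp [orbitalLoopA]
  | cons c rest ih =>
    intro dim acc
    have hc : c < gl := h c (by simp)
    have hrest : ∀ x ∈ rest, x < gl := fun x hx => h x (by simp [hx])
    simp only [orbitalLoopA, if_pos hc, ih hrest, List.foldr_cons]
    congr 1
    ring

-- ===== VERDICT =====
theorem orbital_id_spec : Claim_equal_orbital_id := by
  intro gl gcs spin _ hpre
  have hall : gcs.all (fun c => decide (c < gl)) = true := by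
    simp only [List.all_eq_true, decide_eq_true_eq]; exact hpre
  unfold Spec_orbital_id orbital_id orbital_id_alt
  rw [loopA_ok gl gcs hpre 0 0, if_pos hall]
  cases spin <;> simp <;> ring
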